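-- pv_equiv track=rewrite | github.com/joaocarloszucchi/Semester7 | Compiladores/exercicios1/exercicio3.py | validateToken
-- ===== SOURCE A (Python) =====
-- def validateToken(token):
--     a = 0
--     b = 0
--     c = 0
--
--     if len(token) == 0:
--         # ε n está no alfabeto
--         return False
--
--     for i in token:
--         if i == 'a':
--             if b + c != 0:
--                 #evite situações em que um b ou c foi lido antes de um a
--                 return False
--             a += 1
--         elif i == 'b':
--             if c != 0:
--                 #evite situações em que um c foi lido antes de um b
--                 return False
--             b += 1
--         elif i == 'c':
--             c += 1
--         else:
--             #caractere n está no alfabeto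
--             return False
--
--     if c >= a + b or (a == 0 and b == 0):
--         return False
--     return True
-- ===== SOURCE B (Python) =====
-- def validateToken(token):
--     a = token.count('a')
--     b = token.count('b')
--     c = token.count('c')
--     return token == 'a' * a + 'b' * b + 'c' * c and c < a + b
-- ===== Notes on version B (the rewrite author's own statement) =====
-- stated objective: simpler
-- what changed: Replaces the hand-rolled per-character state-machine loop (three counters with early returns) by counting each of the three letters once with str.count and comparing the token against the canonical reconstruction built from replicated letters, then applying the simplified threshold c < a+b (which subsumes A's explicit empty-string and zero-count checks).
import Mathlib
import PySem

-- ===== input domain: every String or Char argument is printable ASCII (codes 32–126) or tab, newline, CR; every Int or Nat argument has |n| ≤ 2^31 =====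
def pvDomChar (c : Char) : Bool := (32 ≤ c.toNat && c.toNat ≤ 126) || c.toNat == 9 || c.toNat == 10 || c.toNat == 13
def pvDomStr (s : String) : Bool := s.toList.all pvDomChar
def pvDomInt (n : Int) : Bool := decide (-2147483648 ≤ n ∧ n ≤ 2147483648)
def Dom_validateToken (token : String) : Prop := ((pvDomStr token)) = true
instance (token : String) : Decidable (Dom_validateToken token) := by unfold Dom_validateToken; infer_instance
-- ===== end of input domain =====

-- B replaces A's per-character counter automaton by counting each letter once and
-- comparing the token with the canonical reconstruction 'a'*a+'b'*b+'c'*c (simpler).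

-- ===== PORT A =====
-- A's for-loop with early returns: none = one of A's in-loop 'return False'.
def pvLoopA : List Char → Int → Int → Int → Option (Int × Int × Int)
  | [], a, b, c => some (a, b, c)
  | ch :: rest, a, b, c =>
    if ch = 'a' then
      (if b + c ≠ 0 then none else pvLoopA rest (a + 1) b c)
    else if ch = 'b' then
      (if c ≠ 0 then none else pvLoopA rest a (b + 1) c)
    else if ch = 'c' then
      pvLoopA rest a b (c + 1)
    else none

def validateToken (token : String) : Bool :=
  let l := token.toList
  if l.length = 0 then false
  else
    match pvLoopA l 0 0 0 with
    | none => false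
    | some (a, b, c) => if c ≥ a + b ∨ (a = 0 ∧ b = 0) then false else true

-- ===== PORT B =====
-- str.count with a one-character needle is List.count on .toList (exact);
-- 'a'*a + 'b'*b + 'c'*c is the replicate-append; '==' on str is list equality of code points.
def validateToken_alt (token : String) : Bool :=
  let l := token.toList
  let a := l.count 'a'
  let b := l.count 'b'
  let c := l.count 'c'
  decide (l = List.replicate a 'a' ++ List.replicate b 'b' ++ List.replicate c 'c') && decide (c < a + b)

-- ===== PRECONDITION & SPEC =====
def Spec_validateToken (token : String) (out : Bool) : Prop := out = validateToken_alt token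
instance (token : String) (out : Bool) : Decidable (Spec_validateToken token out) := by unfold Spec_validateToken; infer_instance

-- ===== CLAIM (what is proved, stated in full; the proofs are below) =====
def Claim_equal_validateToken : Prop := ∀ (token : String), Dom_validateToken token → Spec_validateToken token (validateToken token)

-- ===== LEMMAS AND PROOFS =====

-- the three states of A's automaton as suffix languages: c*, b*c*, a*b*c*
def pvOkC : List Char → Bool
  | [] => true
  | ch :: r => ch = 'c' && pvOkC r

def pvOkB : List Char → Bool
  | [] => true
  | ch :: r => if ch = 'b' then pvOkB r else ch = 'c' && pvOkC r

def pvOkA : List Char → Bool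
  | [] => true
  | ch :: r => if ch = 'a' then pvOkA r else if ch = 'b' then pvOkB r else ch = 'c' && pvOkC r

-- A's loop succeeds exactly on the language of its current state, and then returns the counts
theorem pvLoopA_eq (l : List Char) : ∀ a b c : Int, 0 ≤ b → 0 ≤ c →
    pvLoopA l a b c =
      if (if b + c = 0 then pvOkA l else if c = 0 then pvOkB l else pvOkC l) then
        some (a + l.count 'a', b + l.count 'b', c + l.count 'c')
      else none := by
  induction l with
  | nil => intro a b c hb hc; simp [pvLoopA, pvOkA, pvOkB, pvOkC]
  | cons x t ih =>
    intro a b c hb hc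
    by_cases hxa : x = 'a'
    · subst hxa
      by_cases h0 : b + c = 0
      · have hb0 : b = 0 := by omega
        have hc0 : c = 0 := by omega
        subst hb0; subst hc0
        have hL : pvLoopA ('a' :: t) a 0 0 = pvLoopA t (a + 1) 0 0 := by
          simp [pvLoopA]
        rw [hL, ih (a + 1) 0 0 le_rfl le_rfl]
        simp [pvOkA, List.count_cons]
        split_ifs <;> simp <;> ring_nf <;> omega
      · by_cases hc0 : c = 0
        · simp [pvLoopA, pvOkB, h0, hc0, (show b ≠ 0 by omega)]
        · simp [pvLoopA, pvOkC, h0, hc0, (show ¬ (b + c = 0) by omega)]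
    · by_cases hxb : x = 'b'
      · subst hxb
        by_cases hc0 : c = 0
        · subst hc0
          have hL : pvLoopA ('b' :: t) a b 0 = pvLoopA t a (b + 1) 0 := by
            simp [pvLoopA]
          rw [hL, ih a (b + 1) 0 (by omega) le_rfl]
          by_cases hb0 : b = 0
          · subst hb0
            simp [pvOkA, pvOkB]
            split_ifs <;> simp <;> ring_nf <;> omega
          · simp [pvOkB, (show ¬ (b + 0 = 0) by omega), (show ¬ (b + 1 + 0 = 0) by omega), (show b + 1 ≠ 0 by omega)]
            split_ifs <;> simp <;> ring_nf <;> omega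
        · simp [pvLoopA, pvOkC, hc0, (show ¬ (b + c = 0) by omega)]
      · by_cases hxc : x = 'c'
        · subst hxc
          have hL : pvLoopA ('c' :: t) a b c = pvLoopA t a b (c + 1) := by
            simp [pvLoopA]
          rw [hL, ih a b (c + 1) hb (by omega)]
          rw [(show (if b + (c + 1) = 0 then pvOkA t else if c + 1 = 0 then pvOkB t else pvOkC t) = pvOkC t by
            rw [if_neg (by omega), if_neg (by omega)])]
          by_cases h0 : b + c = 0
          · have hb0 : b = 0 := by omega
            have hc0 : c = 0 := by omega
            subst hb0; subst hc0
            simp [pvOkA]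
            split_ifs <;> simp <;> ring_nf <;> omega
          · by_cases hc0 : c = 0
            · simp [pvOkB, h0, hc0]
              split_ifs <;> first | (simp; omega) | rfl | omega
            · simp [pvOkC, h0, hc0]
              split_ifs <;> simp <;> ring_nf <;> omega
        · have hL : pvLoopA (x :: t) a b c = none := by
            simp [pvLoopA, hxa, hxb, hxc]
          rw [hL]
          by_cases h0 : b + c = 0 <;> by_cases hc0 : c = 0 <;>
            simp [pvOkA, pvOkB, pvOkC, hxa, hxb, hxc, h0, hc0]

-- shape lemmas: the ok-languages are exactly the replicate-append shapes
theorem pvOkC_shape (l : List Char) (h : pvOkC l = true) : l = List.replicate l.length 'c' := by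
  induction l with
  | nil => rfl
  | cons x t ih =>
    simp [pvOkC] at h
    obtain ⟨hx, ht⟩ := h
    subst hx
    simp [List.replicate_succ]
    exact ih ht

theorem pvOkB_shape (l : List Char) (h : pvOkB l = true) :
    ∃ y z, l = List.replicate y 'b' ++ List.replicate z 'c' := by
  induction l with
  | nil => exact ⟨0, 0, rfl⟩
  | cons x t ih =>
    by_cases hxb : x = 'b'
    · subst hxb
      simp only [pvOkB, if_pos rfl] at h
      obtain ⟨y, z, ht⟩ := ih h
      exact ⟨y + 1, z, by simp [List.replicate_succ, ht]⟩
    · simp only [pvOkB, if_neg hxb] at h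
      simp at h
      obtain ⟨hx, ht⟩ := h
      subst hx
      exact ⟨0, t.length + 1, by simp [List.replicate_succ, ← pvOkC_shape t ht]⟩

theorem pvOkA_shape (l : List Char) (h : pvOkA l = true) :
    ∃ x y z, l = List.replicate x 'a' ++ List.replicate y 'b' ++ List.replicate z 'c' := by
  induction l with
  | nil => exact ⟨0, 0, 0, rfl⟩
  | cons ch t ih =>
    by_cases hxa : ch = 'a'
    · subst hxa
      simp only [pvOkA, if_pos rfl] at h
      obtain ⟨x, y, z, ht⟩ := ih h
      exact ⟨x + 1, y, z, by simp [List.replicate_succ, ht]⟩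
    · by_cases hxb : ch = 'b'
      · subst hxb
        simp only [pvOkA, if_neg (by decide : ¬ ('b' : Char) = 'a'), if_pos rfl] at h
        obtain ⟨y, z, ht⟩ := pvOkB_shape t h
        exact ⟨0, y + 1, z, by simp [List.replicate_succ, ht]⟩
      · simp only [pvOkA, if_neg hxa, if_neg hxb] at h
        simp at h
        obtain ⟨hx, ht⟩ := h
        subst hx
        exact ⟨0, 0, t.length + 1, by simp [List.replicate_succ, ← pvOkC_shape t ht]⟩

theorem pvOkC_rep (z : ℕ) : pvOkC (List.replicate z 'c') = true := by
  induction z with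
  | zero => rfl
  | succ n ih => simp [List.replicate_succ, pvOkC, ih]

theorem pvOkB_rep (y z : ℕ) : pvOkB (List.replicate y 'b' ++ List.replicate z 'c') = true := by
  induction y with
  | zero =>
    cases z with
    | zero => rfl
    | succ n => simp [List.replicate_succ, pvOkB, pvOkC_rep]
  | succ n ih => simp [List.replicate_succ, pvOkB, ih]

theorem pvOkA_rep (x y z : ℕ) :
    pvOkA (List.replicate x 'a' ++ List.replicate y 'b' ++ List.replicate z 'c') = true := by
  induction x with
  | zero =>
    cases y with
    | zero =>
      cases z with
      | zero => rfl
      | succ n => simp [List.replicate_succ, pvOkA, pvOkC_rep]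
    | succ n => simp [List.replicate_succ, pvOkA, pvOkB_rep]
  | succ n ih =>
    simp only [List.replicate_succ, List.cons_append, pvOkA, if_pos rfl]
    simpa using ih

theorem pv_counts (x y z : ℕ) :
    (List.replicate x 'a' ++ List.replicate y 'b' ++ List.replicate z 'c').count 'a' = x ∧
    (List.replicate x 'a' ++ List.replicate y 'b' ++ List.replicate z 'c').count 'b' = y ∧
    (List.replicate x 'a' ++ List.replicate y 'b' ++ List.replicate z 'c').count 'c' = z := by
  simp [List.count_append, List.count_replicate]

-- ===== VERDICT (by name: the statement is the Claim_ definition above) =====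
theorem validateToken_spec : Claim_equal_validateToken := by
  intro token _
  unfold Spec_validateToken validateToken validateToken_alt
  dsimp only
  generalize token.toList = l
  by_cases hnil : l = []
  · subst hnil; decide
  · rw [if_neg (by simpa [List.length_eq_zero_iff] using hnil)]
    rw [pvLoopA_eq l 0 0 0 le_rfl le_rfl]
    rw [(show (if (0:Int) + 0 = 0 then pvOkA l else if (0:Int) = 0 then pvOkB l else pvOkC l) = pvOkA l by norm_num)]
    by_cases hok : pvOkA l = true
    · rw [if_pos hok]
      obtain ⟨x, y, z, hshape⟩ := pvOkA_shape l hok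
      subst hshape
      obtain ⟨ha, hb, hc⟩ := pv_counts x y z
      simp only [ha, hb, hc, zero_add, decide_true, Bool.true_and]
      split_ifs with hfin
      · have h2 : ¬ z < x + y := by
          rcases hfin with h | ⟨h1, h2⟩ <;> omega
        simp [h2]
      · have h2 : z < x + y := by push_neg at hfin; omega
        simp [h2]
    · rw [if_neg hok]
      have hne : l ≠ List.replicate (l.count 'a') 'a' ++ List.replicate (l.count 'b') 'b' ++
          List.replicate (l.count 'c') 'c' := by
        intro heq
        exact hok (by rw [heq]; exact pvOkA_rep _ _ _)
      rw [decide_eq_false hne]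
      simp
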